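-- pv_equiv track=rewrite | github.com/versuone/kastagent | core/kwadlib/epicbase.py | convertTerra
-- ===== SOURCE A (Python) =====
-- ALHPANUMS = ['a', 'b', 'c', 'd', 'e', 'f', 'g', 'h', 'i', 'j', 'k', 'l', 'm', 'n', 'o', 'p', 'q', 'r', 's', 't', 'u', 'v', 'w', 'x', 'y', 'z', 'A', 'B', 'C', 'D', 'E', 'F', 'G', 'H', 'I', 'J', 'K', 'L', 'M', 'N', 'O', 'P', 'Q', 'R', 'S', 'T', 'U', 'V', 'W', 'X', 'Y', 'Z', '0', '1', '2', '3', '4', '5', '6', '7', '8', '9']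
--
-- def convertTerra(name, doTerraNames=False, terra_names=None):
--     """
--     This function would convert to Terraform expected names:
--     lowercase alphanumeric characters (a-z, 0-9) and underscores (_),
--     And feed and equivalent table.
--     """
--     if not doTerraNames: return name
--
--     l=[]
--     for c in name:
--         if not c in ALHPANUMS: c = '_'
--         elif c.isupper():c='_' + c.lower()
--         l.append(c)
--     new_name = ''.join(l).lstrip('_')
--
--     terra_names[new_name] = name
--     return new_name
-- ===== SOURCE B (Python) =====
-- import re
--
-- def convertTerra(name, doTerraNames=False, terra_names=None):
--     if not doTerraNames: return name
--     s = re.sub(r'[A-Z]', lambda m: '_' + m.group(0).lower(), name)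
--     s = re.sub(r'[^a-z0-9_]', '_', s)
--     new_name = s.lstrip('_')
--     terra_names[new_name] = name
--     return new_name
-- ===== Notes on version B (the rewrite author's own statement) =====
-- stated objective: idiomatic
-- what changed: Replaces the per-character loop with membership test against a 62-element list by two regex substitution passes (expand uppercase to underscore+lowercase, then replace remaining non-[a-z0-9_] characters) followed by lstrip('_').
import Mathlib
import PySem

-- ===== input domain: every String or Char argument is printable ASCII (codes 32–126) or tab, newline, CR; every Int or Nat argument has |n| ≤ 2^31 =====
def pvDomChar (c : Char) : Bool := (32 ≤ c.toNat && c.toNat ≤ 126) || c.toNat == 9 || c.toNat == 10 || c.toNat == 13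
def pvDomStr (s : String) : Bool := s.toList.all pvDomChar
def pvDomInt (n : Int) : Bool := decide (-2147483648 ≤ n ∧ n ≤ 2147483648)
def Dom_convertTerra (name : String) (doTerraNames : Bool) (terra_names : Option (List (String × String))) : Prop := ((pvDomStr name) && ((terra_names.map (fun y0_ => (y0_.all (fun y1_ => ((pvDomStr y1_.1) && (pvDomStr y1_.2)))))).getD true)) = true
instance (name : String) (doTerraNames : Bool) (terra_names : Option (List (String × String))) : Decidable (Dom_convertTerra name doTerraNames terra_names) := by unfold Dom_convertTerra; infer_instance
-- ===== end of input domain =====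

-- B replaces A's per-character loop (membership test in a 62-element list, branch per char)
-- by two pattern-class substitution passes, as re.sub would do; return-value equivalence only:
-- both Pythons also record new_name -> name in the terra_names dict passed by the caller.

-- ===== PORT A =====
def ALHPANUMS : List Char := ['a', 'b', 'c', 'd', 'e', 'f', 'g', 'h', 'i', 'j', 'k', 'l', 'm', 'n', 'o', 'p', 'q', 'r', 's', 't', 'u', 'v', 'w', 'x', 'y', 'z', 'A', 'B', 'C', 'D', 'E', 'F', 'G', 'H', 'I', 'J', 'K', 'L', 'M', 'N', 'O', 'P', 'Q', 'R', 'S', 'T', 'U', 'V', 'W', 'X', 'Y', 'Z', '0', '1', '2', '3', '4', '5', '6', '7', '8', '9']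

-- the loop body: if not c in ALHPANUMS: c='_' elif c.isupper(): c='_'+c.lower()
def stepA (c : Char) : List Char :=
  if !(ALHPANUMS.contains c) then ['_']
  else if PySem.Chars.isupper c then ['_', PySem.Chars.lowerChar c]
  else [c]

def convertTerra (name : String) (doTerraNames : Bool) (terra_names : Option (List (String × String))) : String :=
  if !doTerraNames then name
  else
    -- l=[]; for c in name: ...; l.append(c)
    let l : List (List Char) := name.toList.foldl (fun l c => l ++ [stepA c]) []
    -- new_name = ''.join(l).lstrip('_')  — .lstrip('_') drops exactly the leading '_' characters
    let new_name := String.mk ((PySem.Chars.join [] l).dropWhile (· == '_'))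
    -- terra_names[new_name] = name : in-place mutation, not observable in the return value
    new_name

-- ===== PORT B =====
-- re.sub(r'[A-Z]', lambda m: '_' + m.group(0).lower(), name): per-char expansion (exact: the
-- pattern matches single ASCII uppercase characters)
def expandB (c : Char) : List Char :=
  if 'A' ≤ c ∧ c ≤ 'Z' then ['_', PySem.Chars.lowerChar c] else [c]

-- re.sub(r'[^a-z0-9_]', '_', s): per-char replacement (exact: single-char character class)
def keepB (c : Char) : Char :=
  if ('a' ≤ c ∧ c ≤ 'z') ∨ ('0' ≤ c ∧ c ≤ '9') ∨ c = '_' then c else '_'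

def convertTerra_alt (name : String) (doTerraNames : Bool) (terra_names : Option (List (String × String))) : String :=
  if !doTerraNames then name
  else
    let s1 := name.toList.flatMap expandB
    let s2 := s1.map keepB
    -- new_name = s.lstrip('_')
    let new_name := String.mk (s2.dropWhile (· == '_'))
    -- terra_names[new_name] = name : in-place mutation, not observable in the return value
    new_name

-- ===== PRECONDITION & SPEC =====
-- Pre_ excludes exactly the inputs where A raises TypeError (doTerraNames truthy with
-- terra_names=None: the item assignment on None fails); B raises there too.
def Pre_convertTerra (name : String) (doTerraNames : Bool) (terra_names : Option (List (String × String))) : Prop :=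
  doTerraNames = true → terra_names ≠ none
instance (name : String) (doTerraNames : Bool) (terra_names : Option (List (String × String))) : Decidable (Pre_convertTerra name doTerraNames terra_names) := by unfold Pre_convertTerra; infer_instance

def pvWitness_convertTerra : String × Bool × (Option (List (String × String))) := ("Ab-C", true, some [])

def Spec_convertTerra (name : String) (doTerraNames : Bool) (terra_names : Option (List (String × String))) (out : String) : Prop := out = convertTerra_alt name doTerraNames terra_names
instance (name : String) (doTerraNames : Bool) (terra_names : Option (List (String × String))) (out : String) : Decidable (Spec_convertTerra name doTerraNames terra_names out) := by unfold Spec_convertTerra; infer_instance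

-- ===== CLAIM (what is proved, stated in full; the proofs are below) =====
def Claim_equal_convertTerra : Prop := ∀ (name : String) (doTerraNames : Bool) (terra_names : Option (List (String × String))), Dom_convertTerra name doTerraNames terra_names → Pre_convertTerra name doTerraNames terra_names → Spec_convertTerra name doTerraNames terra_names (convertTerra name doTerraNames terra_names)

-- ===== LEMMAS AND PROOFS =====

-- A's processing of one character equals B's two passes on that character
lemma stepA_eq_stepB (c : Char) (hdom : pvDomChar c = true) :
    stepA c = (expandB c).map keepB := by
  have key : ∀ n : Nat, (32 ≤ n ∧ n ≤ 126) ∨ n = 9 ∨ n = 10 ∨ n = 13 →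
      stepA (Char.ofNat n) = (expandB (Char.ofNat n)).map keepB := by
    intro n hn
    rcases hn with ⟨h1, h2⟩ | rfl | rfl | rfl
    · interval_cases n <;> decide
    all_goals decide
  have hofNat : Char.ofNat c.toNat = c := Char.ofNat_toNat c
  simp only [pvDomChar, Bool.or_eq_true, Bool.and_eq_true, decide_eq_true_eq,
    beq_iff_eq] at hdom
  have := key c.toNat (by omega)
  rwa [hofNat] at this

lemma join_nil_flatten (l : List (List Char)) : PySem.Chars.join [] l = l.flatten := by
  induction l with
  | nil => simp [PySem.Chars.join_nil]
  | cons a t ih =>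
    cases t with
    | nil => simp [PySem.Chars.join, List.intercalate]
    | cons b t2 =>
      rw [PySem.Chars.join_cons_cons]
      simp_all

lemma foldA_eq_map (cs : List Char) (init : List (List Char)) :
    cs.foldl (fun l c => l ++ [stepA c]) init = init ++ cs.map stepA := by
  induction cs generalizing init with
  | nil => simp
  | cons c cs ih => simp [List.foldl_cons, ih, List.append_assoc]

-- ===== VERDICT (by name: the statement is the Claim_ definition above) =====
lemma flatMap_eq (cs : List Char) (h : ∀ c ∈ cs, pvDomChar c = true) :
    cs.flatMap stepA = cs.flatMap (fun a => (expandB a).map keepB) := by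
  induction cs with
  | nil => rfl
  | cons c cs ih =>
    simp only [List.flatMap_cons]
    rw [stepA_eq_stepB c (h c (by simp)), ih (fun x hx => h x (List.mem_cons_of_mem _ hx))]

theorem convertTerra_spec : Claim_equal_convertTerra := by
  intro name doTerraNames terra_names hdom _
  unfold Spec_convertTerra convertTerra convertTerra_alt
  cases doTerraNames with
  | false => simp
  | true =>
    simp only [Bool.not_true]
    have hdoms : pvDomStr name = true := by
      simp only [Dom_convertTerra, Bool.and_eq_true] at hdom
      exact hdom.1
    have hall : ∀ c ∈ name.toList, pvDomChar c = true := by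
      simpa [pvDomStr, List.all_eq_true] using hdoms
    congr 1
    congr 1
    rw [foldA_eq_map, List.nil_append, join_nil_flatten, List.map_flatMap]
    rw [← List.flatMap_def, flatMap_eq name.toList hall]
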